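-- pv_equiv track=rewrite | github.com/tscizzle/bs-poker-simulation | poker.py | straight_finder
-- ===== SOURCE A (Python) =====
-- def get_card_rank(card):
--     return (card % 13) + 2
--
-- def straight_finder(natural_cards, num_wilds=0):
--     ranks = set(get_card_rank(card) for card in natural_cards)
--
--     straight_top_ranks = []
--     for top_rank in range(14, 4, -1):
--         missing_ranks = set(range(top_rank-4, top_rank+1)) - ranks
--         if len(missing_ranks) <= num_wilds:
--             straight_top_ranks.append(top_rank)
--
--     if len(straight_top_ranks) == 0:
--         return False, {}
--     else:
--         top_rank = max(straight_top_ranks)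
--         return True, { 'top_rank': top_rank }
-- ===== SOURCE B (Python) =====
-- def straight_finder(natural_cards, num_wilds=0):
--     present = [False] * 15
--     for card in natural_cards:
--         present[(card % 13) + 2] = True
--     best = None
--     count = 0
--     for r in range(1, 5):
--         count += present[r]
--     for top in range(5, 15):
--         count += present[top]
--         if 5 - count <= num_wilds:
--             best = top
--         count -= present[top - 4]
--     if best is None:
--         return False, {}
--     return True, {'top_rank': best}
-- ===== Notes on version B (the rewrite author's own statement) =====
-- stated objective: alternative
-- what changed: Replaces the per-window set construction and set-difference (building set(range(t-4,t+1)) - ranks for each of the 10 windows) with one boolean presence array over ranks and a single ascending sliding-window pass that maintains the window's present-count incrementally while tracking the best top rank.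
import Mathlib
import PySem

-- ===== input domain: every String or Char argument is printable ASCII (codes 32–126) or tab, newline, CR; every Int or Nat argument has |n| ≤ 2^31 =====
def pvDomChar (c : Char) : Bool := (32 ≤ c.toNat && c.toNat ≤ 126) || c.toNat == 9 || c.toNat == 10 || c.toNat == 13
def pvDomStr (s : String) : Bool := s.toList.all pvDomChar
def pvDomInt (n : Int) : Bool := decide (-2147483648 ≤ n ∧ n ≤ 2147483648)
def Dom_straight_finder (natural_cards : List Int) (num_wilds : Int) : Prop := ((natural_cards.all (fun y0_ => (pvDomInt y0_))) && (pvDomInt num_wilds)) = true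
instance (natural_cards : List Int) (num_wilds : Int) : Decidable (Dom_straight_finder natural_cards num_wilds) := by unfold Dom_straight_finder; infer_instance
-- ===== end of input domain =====

-- B replaces A's per-window set construction and set-difference with one boolean presence
-- array and an incremental sliding-window count over ascending top ranks (objective: alternative).


-- ===== PORT A =====
def get_card_rank (card : Int) : Int := (PySem.Int.mod card 13) + 2

def straight_finder (natural_cards : List Int) (num_wilds : Int) : Bool × (List (String × Int)) :=
  let ranks : PySem.Set Int := PySem.Set.ofList (natural_cards.map get_card_rank)
  let straight_top_ranks : List Int :=
    (PySem.List.pyRange 14 4 (-1)).foldl (fun acc top_rank =>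
      let missing_ranks : PySem.Set Int :=
        PySem.Set.diff (PySem.Set.ofList (PySem.List.pyRange (top_rank - 4) (top_rank + 1) 1)) ranks
      if PySem.Set.len missing_ranks ≤ num_wilds then acc ++ [top_rank] else acc) []
  -- 'if len(...) == 0: return False, {} else: return True, {'top_rank': max(...)}':
  -- max? is none exactly on the empty list, so the emptiness test and Python's max are this one match
  match PySem.List.max? straight_top_ranks (fun x => x) with
  | none => (false, [])
  | some top_rank => (true, [("top_rank", top_rank)])

-- ===== PORT B =====
-- present[(card % 13) + 2] = True  (the index is always 2..14, in range; list assignment = pySetD)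
def presentOf (natural_cards : List Int) : List Bool :=
  natural_cards.foldl (fun present card => PySem.List.pySetD present ((PySem.Int.mod card 13) + 2) true)
    (List.replicate 15 false)

def straight_finder_alt (natural_cards : List Int) (num_wilds : Int) : Bool × (List (String × Int)) :=
  let present := presentOf natural_cards
  let count : Int := (PySem.List.pyRange 1 5 1).foldl
    (fun c r => c + (if PySem.List.pyGetD present r false then 1 else 0)) 0
  let res : Option Int × Int := (PySem.List.pyRange 5 15 1).foldl
    (fun (s : Option Int × Int) top =>
      let count := s.2 + (if PySem.List.pyGetD present top false then 1 else 0)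
      let best := if 5 - count ≤ num_wilds then some top else s.1
      (best, count - (if PySem.List.pyGetD present (top - 4) false then 1 else 0)))
    (none, count)
  match res.1 with
  | none => (false, [])
  | some top => (true, [("top_rank", top)])

-- ===== PRECONDITION & SPEC =====
def Spec_straight_finder (natural_cards : List Int) (num_wilds : Int) (out : Bool × (List (String × Int))) : Prop := out = straight_finder_alt natural_cards num_wilds
instance (natural_cards : List Int) (num_wilds : Int) (out : Bool × (List (String × Int))) : Decidable (Spec_straight_finder natural_cards num_wilds out) := by unfold Spec_straight_finder; infer_instance

-- ===== CLAIM (what is proved, stated in full; the proofs are below) =====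
def Claim_equal_straight_finder : Prop := ∀ (natural_cards : List Int) (num_wilds : Int), Dom_straight_finder natural_cards num_wilds → Spec_straight_finder natural_cards num_wilds (straight_finder natural_cards num_wilds)

-- ===== LEMMAS AND PROOFS =====
def pvInd (M : List Int) (r : Int) : Int := if r ∈ M then 1 else 0

-- fold invariant for the presence array
theorem pv_present_aux (r : Int) (h0 : 0 ≤ r) (h15 : r < 15) :
    ∀ (nc : List Int) (acc : List Bool), acc.length = 15 →
    (nc.foldl (fun present card => PySem.List.pySetD present ((PySem.Int.mod card 13) + 2) true) acc).getD r.toNat false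
      = (acc.getD r.toNat false || decide (r ∈ nc.map get_card_rank)) := by
  intro nc
  induction nc with
  | nil => intro acc hacc; simp
  | cons c t ih =>
    intro acc hacc
    have hm0 : 0 ≤ PySem.Int.mod c 13 := PySem.Int.mod_nonneg c (by norm_num)
    have hmlt : PySem.Int.mod c 13 < 13 := PySem.Int.mod_lt c (by norm_num)
    rw [List.foldl_cons, ih _ (by rw [PySem.List.length_pySetD, hacc])]
    rw [PySem.List.pySetD_of_nonneg acc true (by omega)]
    have hjlt : (PySem.Int.mod c 13 + 2).toNat < acc.length := by rw [hacc]; omega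
    simp only [List.map_cons, List.mem_cons]
    rw [List.getD_eq_getElem?_getD, List.getD_eq_getElem?_getD]
    by_cases hk : r = get_card_rank c
    · have hteq : r.toNat = (PySem.Int.mod c 13 + 2).toNat := by unfold get_card_rank at hk; omega
      rw [hteq, List.getElem?_set_self hjlt]
      simp [hk]
    · have htne : (PySem.Int.mod c 13 + 2).toNat ≠ r.toNat := by unfold get_card_rank at hk; omega
      rw [List.getElem?_set_ne htne]
      simp [hk]

theorem pv_ind_get (nc : List Int) (r : Int) (h0 : 0 ≤ r) (h15 : r < 15) :
    (if PySem.List.pyGetD (presentOf nc) r false = true then (1:Int) else 0) = pvInd (nc.map get_card_rank) r := by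
  have h := pv_present_aux r h0 h15 nc (List.replicate 15 false) (by simp)
  rw [PySem.List.pyGetD_of_nonneg _ _ h0]
  unfold presentOf pvInd
  have hrep : (List.replicate 15 false).getD r.toNat false = false := by
    rw [List.getD_eq_getElem?_getD, List.getElem?_replicate]
    split <;> rfl
  rw [h, hrep]
  by_cases hm : r ∈ nc.map get_card_rank <;> simp [hm]

theorem pv_len_filter (M : List Int) : ∀ (L : List Int),
    ((L.filter (fun x => !decide (x ∈ M))).length : Int)
      = (L.length : Int) - L.foldr (fun x s => pvInd M x + s) 0 := by
  intro L
  induction L with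
  | nil => simp
  | cons a L ih =>
    by_cases ha : a ∈ M <;>
      simp [ha, pvInd, ih] <;> omega

theorem pv_win (M : List Int) (w t : Int) :
    (PySem.Set.len (PySem.Set.diff (PySem.Set.ofList (PySem.List.pyRange (t - 4) (t + 1) 1)) (PySem.Set.ofList M)) ≤ w) ↔
    (5 - (pvInd M (t-4) + pvInd M (t-3) + pvInd M (t-2) + pvInd M (t-1) + pvInd M t) ≤ w) := by
  have hw : PySem.List.pyRange (t-4) (t+1) 1 = [t-4, t-4+1, t-4+1+1, t-4+1+1+1, t-4+1+1+1+1] := by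
    rw [PySem.List.pyRange_one_cons (by omega), PySem.List.pyRange_one_cons (by omega),
        PySem.List.pyRange_one_cons (by omega), PySem.List.pyRange_one_cons (by omega),
        PySem.List.pyRange_one_cons (by omega), PySem.List.pyRange_one_eq_nil (by omega)]
  rw [hw, show t-4+1 = t-3 from by omega, show t-3+1 = t-2 from by omega,
      show t-2+1 = t-1 from by omega, show t-1+1 = t from by omega]
  rw [show PySem.Set.ofList [t-4,t-3,t-2,t-1,t] = ([t-4,t-3,t-2,t-1,t] : List Int)
      from PySem.Set.ofList_eq_self_of_nodup [t-4,t-3,t-2,t-1,t] (by simp [List.nodup_cons])]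
  have hdiff : PySem.Set.diff ([t-4,t-3,t-2,t-1,t] : List Int) (PySem.Set.ofList M)
      = ([t-4,t-3,t-2,t-1,t] : List Int).filter (fun x => !(PySem.Set.ofList M).contains x) := rfl
  have hc : (fun x => !(PySem.Set.ofList M).contains x) = (fun x : Int => !decide (x ∈ M)) := by
    funext x
    simp [List.contains_eq_mem, PySem.Set.mem_ofList]
  rw [hdiff, hc, show PySem.Set.len = (fun s : PySem.Set Int => (s.length : Int)) from rfl]
  simp only []
  rw [pv_len_filter]
  simp only [List.foldr_cons, List.foldr_nil, List.length_cons, List.length_nil]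
  generalize pvInd M (t-4) = j1
  generalize pvInd M (t-3) = j2
  generalize pvInd M (t-2) = j3
  generalize pvInd M (t-1) = j4
  generalize pvInd M t = j5
  push_cast
  omega

theorem pv_foldl_max : ∀ (t : List Int) (x : Int), (∀ y ∈ t, y ≤ x) → t.foldl max x = x := by
  intro t
  induction t with
  | nil => intro x _; rfl
  | cons a t ih =>
    intro x hb
    rw [List.foldl_cons, max_eq_left (hb a (by simp))]
    exact ih x (fun y hy => hb y (by simp [hy]))

theorem pv_max_desc : ∀ (l : List Int), l.Pairwise (· > ·) → PySem.List.max? l (fun x => x) = l.head? := by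
  intro l hl
  cases l with
  | nil => rfl
  | cons x t =>
    rw [PySem.List.max?_id_cons, List.head?_cons]
    rw [pv_foldl_max t x (fun y hy => le_of_lt ((List.pairwise_cons.mp hl).1 y hy))]

theorem pv_max_desc_filter (g : Int → Bool) (ts : List Int) (h : ts.Pairwise (· > ·)) :
    PySem.List.max? (ts.filter g) (fun x => x) = ts.find? g := by
  rw [pv_max_desc _ (h.filter g), List.head?_filter]

theorem pv_find?_decide (C : Int → Prop) [DecidablePred C] (a : Int) (l : List Int) :
    List.find? (fun t => decide (C t)) (a :: l) = if C a then some a else List.find? (fun t => decide (C t)) l := by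
  by_cases h : C a <;> simp [h]

theorem pv_main (nc : List Int) (w : Int) : straight_finder nc w = straight_finder_alt nc w := by
  unfold straight_finder straight_finder_alt
  dsimp only
  rw [show PySem.List.pyRange 14 4 (-1) = [14,13,12,11,10,9,8,7,6,5] from by decide,
      PySem.List.foldl_append_ite_eq_filter, List.nil_append]
  rw [List.filter_congr (q := fun t => decide (5 - (pvInd (nc.map get_card_rank) (t-4) + pvInd (nc.map get_card_rank) (t-3) + pvInd (nc.map get_card_rank) (t-2) + pvInd (nc.map get_card_rank) (t-1) + pvInd (nc.map get_card_rank) t) ≤ w))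
      (fun t _ => by rw [decide_eq_decide]; exact pv_win (nc.map get_card_rank) w t)]
  rw [pv_max_desc_filter _ _ (by decide)]
  rw [show (fun t => decide (5 - (pvInd (nc.map get_card_rank) (t-4) + pvInd (nc.map get_card_rank) (t-3) + pvInd (nc.map get_card_rank) (t-2) + pvInd (nc.map get_card_rank) (t-1) + pvInd (nc.map get_card_rank) t) ≤ w)) = (fun t => decide ((fun s => 5 - (pvInd (nc.map get_card_rank) (s-4) + pvInd (nc.map get_card_rank) (s-3) + pvInd (nc.map get_card_rank) (s-2) + pvInd (nc.map get_card_rank) (s-1) + pvInd (nc.map get_card_rank) s) ≤ w) t)) from rfl]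
  simp only [pv_find?_decide, List.find?_nil]
  rw [show PySem.List.pyRange 1 5 1 = [1,2,3,4] from by decide,
      show PySem.List.pyRange 5 15 1 = [5,6,7,8,9,10,11,12,13,14] from by decide]
  simp only [List.foldl_cons, List.foldl_nil]
  rw [show ((5:Int)-4) = 1 from by norm_num,
      show ((5:Int)-3) = 2 from by norm_num,
      show ((5:Int)-2) = 3 from by norm_num,
      show ((5:Int)-1) = 4 from by norm_num,
      show ((6:Int)-4) = 2 from by norm_num,
      show ((6:Int)-3) = 3 from by norm_num,
      show ((6:Int)-2) = 4 from by norm_num,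
      show ((6:Int)-1) = 5 from by norm_num,
      show ((7:Int)-4) = 3 from by norm_num,
      show ((7:Int)-3) = 4 from by norm_num,
      show ((7:Int)-2) = 5 from by norm_num,
      show ((7:Int)-1) = 6 from by norm_num,
      show ((8:Int)-4) = 4 from by norm_num,
      show ((8:Int)-3) = 5 from by norm_num,
      show ((8:Int)-2) = 6 from by norm_num,
      show ((8:Int)-1) = 7 from by norm_num,
      show ((9:Int)-4) = 5 from by norm_num,
      show ((9:Int)-3) = 6 from by norm_num,
      show ((9:Int)-2) = 7 from by norm_num,
      show ((9:Int)-1) = 8 from by norm_num,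
      show ((10:Int)-4) = 6 from by norm_num,
      show ((10:Int)-3) = 7 from by norm_num,
      show ((10:Int)-2) = 8 from by norm_num,
      show ((10:Int)-1) = 9 from by norm_num,
      show ((11:Int)-4) = 7 from by norm_num,
      show ((11:Int)-3) = 8 from by norm_num,
      show ((11:Int)-2) = 9 from by norm_num,
      show ((11:Int)-1) = 10 from by norm_num,
      show ((12:Int)-4) = 8 from by norm_num,
      show ((12:Int)-3) = 9 from by norm_num,
      show ((12:Int)-2) = 10 from by norm_num,
      show ((12:Int)-1) = 11 from by norm_num,
      show ((13:Int)-4) = 9 from by norm_num,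
      show ((13:Int)-3) = 10 from by norm_num,
      show ((13:Int)-2) = 11 from by norm_num,
      show ((13:Int)-1) = 12 from by norm_num,
      show ((14:Int)-4) = 10 from by norm_num,
      show ((14:Int)-3) = 11 from by norm_num,
      show ((14:Int)-2) = 12 from by norm_num,
      show ((14:Int)-1) = 13 from by norm_num]
  simp only [pv_ind_get, Int.reduceLE, Int.reduceLT]
  have hq5 : (5 - (0 + pvInd (List.map get_card_rank nc) 1 + pvInd (List.map get_card_rank nc) 2 + pvInd (List.map get_card_rank nc) 3 + pvInd (List.map get_card_rank nc) 4 + pvInd (List.map get_card_rank nc) 5) ≤ w) ↔ (5 - (pvInd (List.map get_card_rank nc) 1 + pvInd (List.map get_card_rank nc) 2 + pvInd (List.map get_card_rank nc) 3 + pvInd (List.map get_card_rank nc) 4 + pvInd (List.map get_card_rank nc) 5) ≤ w) := by generalize pvInd (List.map get_card_rank nc) 1 = j1; generalize pvInd (List.map get_card_rank nc) 2 = j2; generalize pvInd (List.map get_card_rank nc) 3 = j3; generalize pvInd (List.map get_card_rank nc) 4 = j4; generalize pvInd (List.map get_card_rank nc) 5 = j5; generalize pvInd (List.map get_card_rank nc)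 6 = j6; generalize pvInd (List.map get_card_rank nc) 7 = j7; generalize pvInd (List.map get_card_rank nc) 8 = j8; generalize pvInd (List.map get_card_rank nc) 9 = j9; generalize pvInd (List.map get_card_rank nc) 10 = j10; generalize pvInd (List.map get_card_rank nc) 11 = j11; generalize pvInd (List.map get_card_rank nc) 12 = j12; generalize pvInd (List.map get_card_rank nc) 13 = j13; generalize pvInd (List.map get_card_rank nc) 14 = j14; omega
  have hq6 : (5 - (0 + pvInd (List.map get_card_rank nc) 1 + pvInd (List.map get_card_rank nc) 2 + pvInd (List.map get_card_rank nc) 3 + pvInd (List.map get_card_rank nc) 4 + pvInd (List.map get_card_rank nc) 5 - pvInd (List.map get_card_rank nc) 1 + pvInd (List.map get_card_rank nc) 6) ≤ w) ↔ (5 - (pvInd (List.map get_card_rank nc) 2 + pvInd (List.map get_card_rank nc) 3 + pvInd (List.map get_card_rank nc) 4 + pvInd (List.map get_card_rank nc) 5 + pvInd (List.map get_card_rank nc) 6) ≤ w) := by generalize pvInd (List.map get_card_rank nc) 1 = j1; generalize pvInd (List.map get_card_rank nc) 2 = j2; generalize pvInd (List.map get_card_rank nc) 3 = j3; generalize pvInd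 (List.map get_card_rank nc) 4 = j4; generalize pvInd (List.map get_card_rank nc) 5 = j5; generalize pvInd (List.map get_card_rank nc) 6 = j6; generalize pvInd (List.map get_card_rank nc) 7 = j7; generalize pvInd (List.map get_card_rank nc) 8 = j8; generalize pvInd (List.map get_card_rank nc) 9 = j9; generalize pvInd (List.map get_card_rank nc) 10 = j10; generalize pvInd (List.map get_card_rank nc) 11 = j11; generalize pvInd (List.map get_card_rank nc) 12 = j12; generalize pvInd (List.map get_card_rank nc) 13 = j13; generalize pvInd (List.map get_card_rank nc) 14 = j14; omega
  have hq7 : (5 - (0 + pvInd (List.map get_card_rank nc) 1 + pvInd (List.map get_card_rank nc) 2 + pvInd (List.map get_card_rank nc) 3 + pvInd (List.map get_card_rank nc) 4 + pvInd (List.map get_card_rank nc) 5 - pvInd (List.map get_card_rank nc) 1 + pvInd (List.map get_card_rank nc) 6 - pvInd (List.map get_card_rank nc) 2 + pvInd (List.map get_card_rank nc) 7) ≤ w) ↔ (5 - (pvInd (List.map get_card_rank nc) 3 + pvInd (List.map get_card_rank nc) 4 + pvInd (List.map get_card_rank nc) 5 + pvInd (List.map get_card_rank nc) 6 + pvInd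 (List.map get_card_rank nc) 7) ≤ w) := by generalize pvInd (List.map get_card_rank nc) 1 = j1; generalize pvInd (List.map get_card_rank nc) 2 = j2; generalize pvInd (List.map get_card_rank nc) 3 = j3; generalize pvInd (List.map get_card_rank nc) 4 = j4; generalize pvInd (List.map get_card_rank nc) 5 = j5; generalize pvInd (List.map get_card_rank nc) 6 = j6; generalize pvInd (List.map get_card_rank nc) 7 = j7; generalize pvInd (List.map get_card_rank nc) 8 = j8; generalize pvInd (List.map get_card_rank nc) 9 = j9; generalize pvInd (List.map get_card_rank nc) 10 = j10; generalize pvInd (List.map get_card_rank nc) 11 = j11; generalize pvInd (List.map get_card_rank nc) 12 = j12; generalize pvInd (List.map get_card_rank nc) 13 = j13; generalize pvInd (List.map get_card_rank nc) 14 = j14; omega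
  have hq8 : (5 - (0 + pvInd (List.map get_card_rank nc) 1 + pvInd (List.map get_card_rank nc) 2 + pvInd (List.map get_card_rank nc) 3 + pvInd (List.map get_card_rank nc) 4 + pvInd (List.map get_card_rank nc) 5 - pvInd (List.map get_card_rank nc) 1 + pvInd (List.map get_card_rank nc) 6 - pvInd (List.map get_card_rank nc) 2 + pvInd (List.map get_card_rank nc) 7 - pvInd (List.map get_card_rank nc) 3 + pvInd (List.map get_card_rank nc) 8) ≤ w) ↔ (5 - (pvInd (List.map get_card_rank nc) 4 + pvInd (List.map get_card_rank nc) 5 + pvInd (List.map get_card_rank nc) 6 + pvInd (List.map get_card_rank nc) 7 + pvInd (List.map get_card_rank nc) 8) ≤ w) := by generalize pvInd (List.map get_card_rank nc) 1 = j1; generalize pvInd (List.map get_card_rank nc) 2 = j2; generalize pvInd (List.map get_card_rank nc) 3 = j3; generalize pvInd (List.map get_card_rank nc) 4 = j4; generalize pvInd (List.map get_card_rank nc) 5 = j5; generalize pvInd (List.map get_card_rank nc) 6 = j6; generalize pvInd (List.map get_card_rank nc) 7 = j7; generalize pvInd (List.map get_card_rank nc) 8 = j8; generalize pvInd (List.map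 get_card_rank nc) 9 = j9; generalize pvInd (List.map get_card_rank nc) 10 = j10; generalize pvInd (List.map get_card_rank nc) 11 = j11; generalize pvInd (List.map get_card_rank nc) 12 = j12; generalize pvInd (List.map get_card_rank nc) 13 = j13; generalize pvInd (List.map get_card_rank nc) 14 = j14; omega
  have hq9 : (5 - (0 + pvInd (List.map get_card_rank nc) 1 + pvInd (List.map get_card_rank nc) 2 + pvInd (List.map get_card_rank nc) 3 + pvInd (List.map get_card_rank nc) 4 + pvInd (List.map get_card_rank nc) 5 - pvInd (List.map get_card_rank nc) 1 + pvInd (List.map get_card_rank nc) 6 - pvInd (List.map get_card_rank nc) 2 + pvInd (List.map get_card_rank nc) 7 - pvInd (List.map get_card_rank nc) 3 + pvInd (List.map get_card_rank nc) 8 - pvInd (List.map get_card_rank nc) 4 + pvInd (List.map get_card_rank nc) 9) ≤ w) ↔ (5 - (pvInd (List.map get_card_rank nc) 5 + pvInd (List.map get_card_rank nc) 6 + pvInd (List.map get_card_rank nc) 7 + pvInd (List.map get_card_rank nc) 8 + pvInd (List.map get_card_rank nc) 9) ≤ w) := by generalize pvInd (List.map get_card_rank nc) 1 = j1; generalize pvInd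 (List.map get_card_rank nc) 2 = j2; generalize pvInd (List.map get_card_rank nc) 3 = j3; generalize pvInd (List.map get_card_rank nc) 4 = j4; generalize pvInd (List.map get_card_rank nc) 5 = j5; generalize pvInd (List.map get_card_rank nc) 6 = j6; generalize pvInd (List.map get_card_rank nc) 7 = j7; generalize pvInd (List.map get_card_rank nc) 8 = j8; generalize pvInd (List.map get_card_rank nc) 9 = j9; generalize pvInd (List.map get_card_rank nc) 10 = j10; generalize pvInd (List.map get_card_rank nc) 11 = j11; generalize pvInd (List.map get_card_rank nc) 12 = j12; generalize pvInd (List.map get_card_rank nc) 13 = j13; generalize pvInd (List.map get_card_rank nc) 14 = j14; omega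
  have hq10 : (5 - (0 + pvInd (List.map get_card_rank nc) 1 + pvInd (List.map get_card_rank nc) 2 + pvInd (List.map get_card_rank nc) 3 + pvInd (List.map get_card_rank nc) 4 + pvInd (List.map get_card_rank nc) 5 - pvInd (List.map get_card_rank nc) 1 + pvInd (List.map get_card_rank nc) 6 - pvInd (List.map get_card_rank nc) 2 + pvInd (List.map get_card_rank nc) 7 - pvInd (List.map get_card_rank nc) 3 + pvInd (List.map get_card_rank nc) 8 - pvInd (List.map get_card_rank nc) 4 + pvInd (List.map get_card_rank nc) 9 - pvInd (List.map get_card_rank nc) 5 + pvInd (List.map get_card_rank nc) 10) ≤ w) ↔ (5 - (pvInd (List.map get_card_rank nc) 6 + pvInd (List.map get_card_rank nc) 7 + pvInd (List.map get_card_rank nc) 8 + pvInd (List.map get_card_rank nc) 9 + pvInd (List.map get_card_rank nc) 10) ≤ w) := by generalize pvInd (List.map get_card_rank nc) 1 = j1; generalize pvInd (List.map get_card_rank nc) 2 = j2; generalize pvInd (List.map get_card_rank nc) 3 = j3; generalize pvInd (List.map get_card_rank nc) 4 = j4; generalize pvInd (List.map get_card_rank nc) 5 = j5; generalize pvInd (List.map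 get_card_rank nc) 6 = j6; generalize pvInd (List.map get_card_rank nc) 7 = j7; generalize pvInd (List.map get_card_rank nc) 8 = j8; generalize pvInd (List.map get_card_rank nc) 9 = j9; generalize pvInd (List.map get_card_rank nc) 10 = j10; generalize pvInd (List.map get_card_rank nc) 11 = j11; generalize pvInd (List.map get_card_rank nc) 12 = j12; generalize pvInd (List.map get_card_rank nc) 13 = j13; generalize pvInd (List.map get_card_rank nc) 14 = j14; omega
  have hq11 : (5 - (0 + pvInd (List.map get_card_rank nc) 1 + pvInd (List.map get_card_rank nc) 2 + pvInd (List.map get_card_rank nc) 3 + pvInd (List.map get_card_rank nc) 4 + pvInd (List.map get_card_rank nc) 5 - pvInd (List.map get_card_rank nc) 1 + pvInd (List.map get_card_rank nc) 6 - pvInd (List.map get_card_rank nc) 2 + pvInd (List.map get_card_rank nc) 7 - pvInd (List.map get_card_rank nc) 3 + pvInd (List.map get_card_rank nc) 8 - pvInd (List.map get_card_rank nc) 4 + pvInd (List.map get_card_rank nc) 9 - pvInd (List.map get_card_rank nc) 5 + pvInd (List.map get_card_rank nc) 10 - pvInd (List.map get_card_rank nc) 6 + pvInd (List.map get_card_rank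 nc) 11) ≤ w) ↔ (5 - (pvInd (List.map get_card_rank nc) 7 + pvInd (List.map get_card_rank nc) 8 + pvInd (List.map get_card_rank nc) 9 + pvInd (List.map get_card_rank nc) 10 + pvInd (List.map get_card_rank nc) 11) ≤ w) := by generalize pvInd (List.map get_card_rank nc) 1 = j1; generalize pvInd (List.map get_card_rank nc) 2 = j2; generalize pvInd (List.map get_card_rank nc) 3 = j3; generalize pvInd (List.map get_card_rank nc) 4 = j4; generalize pvInd (List.map get_card_rank nc) 5 = j5; generalize pvInd (List.map get_card_rank nc) 6 = j6; generalize pvInd (List.map get_card_rank nc) 7 = j7; generalize pvInd (List.map get_card_rank nc) 8 = j8; generalize pvInd (List.map get_card_rank nc) 9 = j9; generalize pvInd (List.map get_card_rank nc) 10 = j10; generalize pvInd (List.map get_card_rank nc) 11 = j11; generalize pvInd (List.map get_card_rank nc) 12 = j12; generalize pvInd (List.map get_card_rank nc) 13 = j13; generalize pvInd (List.map get_card_rank nc) 14 = j14; omega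
  have hq12 : (5 - (0 + pvInd (List.map get_card_rank nc) 1 + pvInd (List.map get_card_rank nc) 2 + pvInd (List.map get_card_rank nc) 3 + pvInd (List.map get_card_rank nc) 4 + pvInd (List.map get_card_rank nc) 5 - pvInd (List.map get_card_rank nc) 1 + pvInd (List.map get_card_rank nc) 6 - pvInd (List.map get_card_rank nc) 2 + pvInd (List.map get_card_rank nc) 7 - pvInd (List.map get_card_rank nc) 3 + pvInd (List.map get_card_rank nc) 8 - pvInd (List.map get_card_rank nc) 4 + pvInd (List.map get_card_rank nc) 9 - pvInd (List.map get_card_rank nc) 5 + pvInd (List.map get_card_rank nc) 10 - pvInd (List.map get_card_rank nc) 6 + pvInd (List.map get_card_rank nc) 11 - pvInd (List.map get_card_rank nc) 7 + pvInd (List.map get_card_rank nc) 12) ≤ w) ↔ (5 - (pvInd (List.map get_card_rank nc) 8 + pvInd (List.map get_card_rank nc) 9 + pvInd (List.map get_card_rank nc) 10 + pvInd (List.map get_card_rank nc) 11 + pvInd (List.map get_card_rank nc) 12) ≤ w) := by generalize pvInd (List.map get_card_rank nc) 1 = j1; generalize pvInd (List.map get_card_rank nc) 2 = j2; generalize pvInd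 (List.map get_card_rank nc) 3 = j3; generalize pvInd (List.map get_card_rank nc) 4 = j4; generalize pvInd (List.map get_card_rank nc) 5 = j5; generalize pvInd (List.map get_card_rank nc) 6 = j6; generalize pvInd (List.map get_card_rank nc) 7 = j7; generalize pvInd (List.map get_card_rank nc) 8 = j8; generalize pvInd (List.map get_card_rank nc) 9 = j9; generalize pvInd (List.map get_card_rank nc) 10 = j10; generalize pvInd (List.map get_card_rank nc) 11 = j11; generalize pvInd (List.map get_card_rank nc) 12 = j12; generalize pvInd (List.map get_card_rank nc) 13 = j13; generalize pvInd (List.map get_card_rank nc) 14 = j14; omega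
  have hq13 : (5 - (0 + pvInd (List.map get_card_rank nc) 1 + pvInd (List.map get_card_rank nc) 2 + pvInd (List.map get_card_rank nc) 3 + pvInd (List.map get_card_rank nc) 4 + pvInd (List.map get_card_rank nc) 5 - pvInd (List.map get_card_rank nc) 1 + pvInd (List.map get_card_rank nc) 6 - pvInd (List.map get_card_rank nc) 2 + pvInd (List.map get_card_rank nc) 7 - pvInd (List.map get_card_rank nc) 3 + pvInd (List.map get_card_rank nc) 8 - pvInd (List.map get_card_rank nc) 4 + pvInd (List.map get_card_rank nc) 9 - pvInd (List.map get_card_rank nc) 5 + pvInd (List.map get_card_rank nc) 10 - pvInd (List.map get_card_rank nc) 6 + pvInd (List.map get_card_rank nc) 11 - pvInd (List.map get_card_rank nc) 7 + pvInd (List.map get_card_rank nc) 12 - pvInd (List.map get_card_rank nc) 8 + pvInd (List.map get_card_rank nc) 13) ≤ w) ↔ (5 - (pvInd (List.map get_card_rank nc) 9 + pvInd (List.map get_card_rank nc) 10 + pvInd (List.map get_card_rank nc) 11 + pvInd (List.map get_card_rank nc) 12 + pvInd (List.map get_card_rank nc) 13) ≤ w) := by generalize pvInd (List.map get_card_rank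 nc) 1 = j1; generalize pvInd (List.map get_card_rank nc) 2 = j2; generalize pvInd (List.map get_card_rank nc) 3 = j3; generalize pvInd (List.map get_card_rank nc) 4 = j4; generalize pvInd (List.map get_card_rank nc) 5 = j5; generalize pvInd (List.map get_card_rank nc) 6 = j6; generalize pvInd (List.map get_card_rank nc) 7 = j7; generalize pvInd (List.map get_card_rank nc) 8 = j8; generalize pvInd (List.map get_card_rank nc) 9 = j9; generalize pvInd (List.map get_card_rank nc) 10 = j10; generalize pvInd (List.map get_card_rank nc) 11 = j11; generalize pvInd (List.map get_card_rank nc) 12 = j12; generalize pvInd (List.map get_card_rank nc) 13 = j13; generalize pvInd (List.map get_card_rank nc) 14 = j14; omega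
  have hq14 : (5 - (0 + pvInd (List.map get_card_rank nc) 1 + pvInd (List.map get_card_rank nc) 2 + pvInd (List.map get_card_rank nc) 3 + pvInd (List.map get_card_rank nc) 4 + pvInd (List.map get_card_rank nc) 5 - pvInd (List.map get_card_rank nc) 1 + pvInd (List.map get_card_rank nc) 6 - pvInd (List.map get_card_rank nc) 2 + pvInd (List.map get_card_rank nc) 7 - pvInd (List.map get_card_rank nc) 3 + pvInd (List.map get_card_rank nc) 8 - pvInd (List.map get_card_rank nc) 4 + pvInd (List.map get_card_rank nc) 9 - pvInd (List.map get_card_rank nc) 5 + pvInd (List.map get_card_rank nc) 10 - pvInd (List.map get_card_rank nc) 6 + pvInd (List.map get_card_rank nc) 11 - pvInd (List.map get_card_rank nc) 7 + pvInd (List.map get_card_rank nc) 12 - pvInd (List.map get_card_rank nc) 8 + pvInd (List.map get_card_rank nc) 13 - pvInd (List.map get_card_rank nc) 9 + pvInd (List.map get_card_rank nc) 14) ≤ w) ↔ (5 - (pvInd (List.map get_card_rank nc) 10 + pvInd (List.map get_card_rank nc) 11 + pvInd (List.map get_card_rank nc) 12 + pvInd (List.map get_card_rank nc) 13 + pvInd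 (List.map get_card_rank nc) 14) ≤ w) := by generalize pvInd (List.map get_card_rank nc) 1 = j1; generalize pvInd (List.map get_card_rank nc) 2 = j2; generalize pvInd (List.map get_card_rank nc) 3 = j3; generalize pvInd (List.map get_card_rank nc) 4 = j4; generalize pvInd (List.map get_card_rank nc) 5 = j5; generalize pvInd (List.map get_card_rank nc) 6 = j6; generalize pvInd (List.map get_card_rank nc) 7 = j7; generalize pvInd (List.map get_card_rank nc) 8 = j8; generalize pvInd (List.map get_card_rank nc) 9 = j9; generalize pvInd (List.map get_card_rank nc) 10 = j10; generalize pvInd (List.map get_card_rank nc) 11 = j11; generalize pvInd (List.map get_card_rank nc) 12 = j12; generalize pvInd (List.map get_card_rank nc) 13 = j13; generalize pvInd (List.map get_card_rank nc) 14 = j14; omega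
  simp only [hq5, hq6, hq7, hq8, hq9, hq10, hq11, hq12, hq13, hq14]

-- ===== VERDICT (by name: the statement is the Claim_ definition above) =====
theorem straight_finder_spec : Claim_equal_straight_finder := by
  intro natural_cards num_wilds _
  unfold Spec_straight_finder
  exact pv_main natural_cards num_wilds
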